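-- pv_equiv track=rewrite | github.com/thepratholic/Competitive-Programming | LeetCode/Weekly Contest 476/Count Distinct Integers After Removing Zeros.py | countDistinct
-- ===== SOURCE A (Python) =====
-- def countDistinct(n: int) -> int:
--     if n < 10:
--         return n
--
--     s = str(n)
--     sz = len(s)
--
--     ans = 0
--     p = 9
--     for i in range(1, sz):
--         ans += p
--         p *= 9
--
--     kdc = 0
--     for i, ch in enumerate(s):
--
--         d = int(s[i])
--         if d == 0:
--             break
--
--         small = d - 1
--         rem = sz - 1 - i
--
--         kdc += small * (9 ** rem)
--
--         if i == sz - 1: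
--             kdc += 1
--
--     ans += kdc
--     return ans
-- ===== SOURCE B (Python) =====
-- def countDistinct(n: int) -> int:
--     if n < 10:
--         return n
--     s = str(n)
--     v = 0
--     for idx, ch in enumerate(s):
--         d = int(ch)
--         if d == 0:
--             # borrow, then fill this and every remaining position with 9
--             v -= 1
--             for _ in range(len(s) - idx):
--                 v = v * 9 + 9
--             return v
--         v = v * 9 + d
--     return v
-- ===== Notes on version B (the rewrite author's own statement) =====
-- stated objective: simpler
-- what changed: A precomputes a geometric sum of 9^k over shorter lengths and then runs a digit-DP rank loop with per-position powers 9**rem; B replaces both loops by one forward multiply-accumulate scan v = v*9 + d (bijective base-9 value), with a single borrow-and-fill of 9s at the first zero digit.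
import Mathlib
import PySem

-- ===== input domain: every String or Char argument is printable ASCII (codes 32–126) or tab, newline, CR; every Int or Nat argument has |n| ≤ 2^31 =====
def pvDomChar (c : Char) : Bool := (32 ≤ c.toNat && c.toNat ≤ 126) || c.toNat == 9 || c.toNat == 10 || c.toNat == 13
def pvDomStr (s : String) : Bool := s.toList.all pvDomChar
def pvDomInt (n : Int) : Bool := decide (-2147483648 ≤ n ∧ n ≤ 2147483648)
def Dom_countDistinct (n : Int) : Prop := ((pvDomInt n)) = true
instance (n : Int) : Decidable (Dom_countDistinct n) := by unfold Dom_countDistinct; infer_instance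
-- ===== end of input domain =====

-- B replaces A's geometric-sum loop plus digit-DP rank loop by a single multiply-accumulate
-- scan (bijective base-9) with one borrow-and-fill at the first zero digit; objective: simpler.


-- ===== PORT A =====
-- int(ch) for a single character; exact on the digit characters str(n) produces
def pvDigit (c : Char) : Int := (PySem.Int.ofChars? [c]).getD 0

-- A's second loop: `for i, ch in enumerate(s): d = int(s[i]); if d == 0: break; …`
-- (s[i] is exactly ch here).  `9 ** rem` with rem = sz-1-i ≥ 0 is 9 ^ (sz-1-i).toNat.
def pvALoop (sz : Int) : List Char → Int → Int → Int
  | [], _, kdc => kdc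
  | ch :: rest, i, kdc =>
      let d := pvDigit ch
      if d = 0 then kdc
      else
        let kdc1 := kdc + (d - 1) * 9 ^ (sz - 1 - i).toNat
        let kdc2 := if i = sz - 1 then kdc1 + 1 else kdc1
        pvALoop sz rest (i + 1) kdc2

def countDistinct (n : Int) : Int :=
  if n < 10 then n
  else
    let s := PySem.Int.toChars n          -- str(n)
    let sz : Int := (s.length : Int)
    -- `ans = 0; p = 9; for i in range(1, sz): ans += p; p *= 9`
    let ansp := (PySem.List.pyRange 1 sz 1).foldl
      (fun (ap : Int × Int) _ => (ap.1 + ap.2, ap.2 * 9)) ((0 : Int), (9 : Int))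
    ansp.1 + pvALoop sz s 0 0

-- ===== PORT B =====
-- `v -= 1; for _ in range(len(s) - idx): v = v * 9 + 9`  (len(s) - idx = remaining suffix length)
def pvFill : Int → Nat → Int
  | v, 0 => v
  | v, k + 1 => pvFill (v * 9 + 9) k

def pvBLoop : List Char → Int → Int
  | [], v => v
  | ch :: rest, v =>
      let d := pvDigit ch
      if d = 0 then pvFill (v - 1) (rest.length + 1)
      else pvBLoop rest (v * 9 + d)

def countDistinct_alt (n : Int) : Int :=
  if n < 10 then n
  else pvBLoop (PySem.Int.toChars n) 0

-- ===== PRECONDITION & SPEC =====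
def Spec_countDistinct (n : Int) (out : Int) : Prop := out = countDistinct_alt n
instance (n : Int) (out : Int) : Decidable (Spec_countDistinct n out) := by unfold Spec_countDistinct; infer_instance

-- ===== CLAIM (what is proved, stated in full; the proofs are below) =====
def Claim_equal_countDistinct : Prop := ∀ (n : Int), Dom_countDistinct n → Spec_countDistinct n (countDistinct n)

-- ===== LEMMAS AND PROOFS =====

-- T m = 1 + 9 + … + 9^(m-1)
def pvT : Nat → Int
  | 0 => 0
  | m + 1 => 1 + 9 * pvT m

theorem pvT_succ_right (m : Nat) : pvT (m + 1) = pvT m + 9 ^ m := by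
  induction m with
  | zero => simp [pvT]
  | succ k ih =>
      have ih' : 1 + 9 * pvT k = pvT k + 9 ^ k := ih
      rw [show pvT (k + 1 + 1) = 1 + 9 * pvT (k + 1) from rfl, ih, pow_succ]
      linarith

theorem pvFill_eq (k : Nat) : ∀ v : Int, pvFill v k = v * 9 ^ k + 9 * pvT k := by
  induction k with
  | zero => intro v; simp [pvFill, pvT]
  | succ k ih =>
      intro v
      rw [pvFill, ih, pvT_succ_right]
      ring

theorem pvAns_fold (l : List Int) : ∀ a p : Int,
    l.foldl (fun (ap : Int × Int) _ => (ap.1 + ap.2, ap.2 * 9)) (a, p)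
      = (a + p * pvT l.length, p * 9 ^ l.length) := by
  induction l with
  | nil => intro a p; simp [pvT]
  | cons x l ih =>
      intro a p
      simp only [List.foldl_cons, ih, List.length_cons, pvT, Prod.mk.injEq]
      refine ⟨by ring, by ring⟩

theorem pvLoop_inv (rest : List Char) : ∀ (sz i kdc v ANS : Int),
    i + (rest.length : Int) = sz →
    ANS + kdc + (if rest.length = 0 then 0 else 1)
      = v * 9 ^ rest.length + pvT rest.length →
    ANS + pvALoop sz rest i kdc = pvBLoop rest v := by
  induction rest with
  | nil =>
      intro sz i kdc v ANS _ hR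
      simp only [pvALoop, pvBLoop]
      simp [pvT] at hR
      linarith
  | cons ch rest ih =>
      intro sz i kdc v ANS hlen hR
      simp only [List.length_cons] at hlen hR
      rw [if_neg (Nat.succ_ne_zero rest.length)] at hR
      push_cast at hlen
      have hrem : (sz - 1 - i).toNat = rest.length := by omega
      have hlast : (i = sz - 1) ↔ rest.length = 0 := by omega
      by_cases hd : pvDigit ch = 0
      · -- A breaks; B borrows and fills
        simp only [pvALoop, pvBLoop, hd, reduceIte]
        rw [pvFill_eq]
        have h9 : (9 : Int) ^ (rest.length + 1) = 1 + 8 * pvT (rest.length + 1) := by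
          have h1 := pvT_succ_right (rest.length + 1)
          have h2 : pvT (rest.length + 1 + 1) = 1 + 9 * pvT (rest.length + 1) := rfl
          linarith
        linear_combination hR + h9
      · -- both consume the digit
        simp only [pvALoop, pvBLoop, hd, ite_false]
        rw [hrem]
        refine ih sz (i + 1) _ (v * 9 + pvDigit ch) ANS (by omega) ?_
        by_cases h0 : rest.length = 0
        · rw [if_pos (hlast.mpr h0), if_pos h0, h0]
          rw [h0] at hR
          norm_num [pvT] at hR ⊢
          linarith
        · rw [if_neg (fun h => h0 (hlast.mp h)), if_neg h0]
          rw [pvT_succ_right, pow_succ] at hR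
          linear_combination hR

theorem pvRange_len (L : Nat) :
    (PySem.List.pyRange 1 (L : Int) 1).length = L - 1 := by
  rw [PySem.List.pyRange_of_pos _ _ (by norm_num : (0:Int) < 1)]
  by_cases h : (1 : Int) < (L : Nat)
  · simp only [h, if_pos, List.length_map, List.length_range]
    omega
  · simp only [h, ite_false, List.length_map, List.length_range]
    omega

theorem pvAns_val (L : Nat) :
    9 * pvT (L - 1) + (if L = 0 then 0 else (1 : Int)) = pvT L := by
  cases L with
  | zero => simp [pvT]
  | succ k => simp [pvT]; ring

-- ===== VERDICT (by name: the statement is the Claim_ definition above) =====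
theorem countDistinct_spec : Claim_equal_countDistinct := by
  intro n _
  unfold Spec_countDistinct countDistinct countDistinct_alt
  by_cases h : n < 10
  · simp [h]
  · simp only [h, ite_false]
    set s := PySem.Int.toChars n with hs
    rw [pvAns_fold, pvRange_len]
    apply pvLoop_inv
    · simp
    · simpa using pvAns_val s.length
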